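-- pv_equiv track=rewrite | github.com/Drogalion01/Codes-of-lifetime | _recheck.py | current
-- ===== SOURCE A (Python) =====
-- def current(n,h,k,a):
--     tmp=[(0,0)]*n
--     idx=[(0,0)]*n
--     for i in range(n):
--         itx=max(a[i:])
--         itn=min(a[:i+1])
--         idx[i]=(a.index(itx,i), a.index(itn,0,i+1))
--         tmp[i]=(itx,itn)
--     s=sum(a)
--     cy=h//s
--     time=cy*n+max(0,cy-1)*k
--     if h%s==0:
--         return time
--     if cy>0:
--         time+=k
--     rem=h%s
--     pref=[0]*(n+1)
--     for i in range(n):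
--         pref[i+1]=pref[i]+a[i]
--     for i in range(1,n+1):
--         if idx[i-1][0]==i-1:
--             time+=1
--             continue
--         hobe=pref[i]-tmp[i-1][1]+tmp[i-1][0]
--         if hobe>=rem:
--             time+=1
--             return time
--         time+=1
--     return time
-- ===== SOURCE B (Python) =====
-- def current(n, h, k, a):
--     # One-pass re-implementation: suffix max + "max attained here" flags in a single
--     # right-to-left sweep, then a single forward loop carrying the running prefix sum
--     # and prefix min (replaces A's per-index slicing/max/min/index, O(n^2) -> O(n)).
--     m = len(a)
--     sufmax = [0] * m
--     att = [False] * m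
--     best = None
--     for i in range(m - 1, -1, -1):
--         if best is None or a[i] >= best:
--             best = a[i]
--             att[i] = True
--         sufmax[i] = best
--     s = sum(a)
--     cy = h // s
--     time = cy * n + max(0, cy - 1) * k
--     rem = h % s
--     if rem == 0:
--         return time
--     if cy > 0:
--         time += k
--     pref = 0
--     pmin = None
--     for i in range(n):
--         x = a[i]
--         pref += x
--         pmin = x if pmin is None else min(pmin, x)
--         time += 1
--         if not att[i] and pref - pmin + sufmax[i] >= rem:
--             return time
--     return time
-- ===== Notes on version B (the rewrite author's own statement) =====
-- stated objective: faster
-- what changed: A recomputes max(a[i:]), min(a[:i+1]) and a.index on slices for every i (quadratic); B does one right-to-left sweep computing each suffix max together with an 'attained here' flag and one forward loop carrying the running prefix sum and prefix min.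
import Mathlib
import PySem

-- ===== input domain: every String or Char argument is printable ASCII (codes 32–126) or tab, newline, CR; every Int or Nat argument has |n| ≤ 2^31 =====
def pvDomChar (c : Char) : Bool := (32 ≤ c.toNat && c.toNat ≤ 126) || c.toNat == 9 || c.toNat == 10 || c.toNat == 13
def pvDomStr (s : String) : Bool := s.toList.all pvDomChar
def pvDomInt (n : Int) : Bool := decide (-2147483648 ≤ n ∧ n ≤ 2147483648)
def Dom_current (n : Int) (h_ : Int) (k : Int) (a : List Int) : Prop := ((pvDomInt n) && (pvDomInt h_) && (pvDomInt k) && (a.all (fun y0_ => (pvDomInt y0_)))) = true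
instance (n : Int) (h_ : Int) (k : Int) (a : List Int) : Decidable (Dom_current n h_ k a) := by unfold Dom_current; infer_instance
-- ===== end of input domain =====

-- B replaces A's per-index slicing with max/min/index (quadratic work) by one
-- right-to-left suffix-max sweep plus one forward loop carrying the running
-- prefix sum and prefix min (objective: faster, linear passes).

-- ===== PORT A =====
-- first loop of A: tmp[i]=(itx,itn), idx[i]=(a.index(itx,i), a.index(itn,0,i+1));
-- max/min of an empty slice are rendered with getD and a.index(v,start) as
-- index?-of-the-slice plus the start offset (exact under Pre_current, which
-- excludes exactly the raising inputs).
def currentRows (a : List Int) (n : Int) : List ((Int × Int) × (Int × Int)) :=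
  (PySem.List.pyRange 0 n 1).map (fun i =>
    let itx := (PySem.List.max? (PySem.List.slice a (some i) none) (fun y => y)).getD 0
    let itn := (PySem.List.min? (PySem.List.slice a none (some (i+1))) (fun y => y)).getD 0
    let j1 : Int := ((PySem.List.index? (PySem.List.slice a (some i) none) itx).map (fun j => (j : Int) + i)).getD 0
    let j2 : Int := ((PySem.List.index? (PySem.List.slice a none (some (i+1))) itn).map (fun j => (j : Int))).getD 0
    ((j1, j2), (itx, itn)))

-- second loop of A, with its early return, over i in range(1, n+1)
def currentLoop (rows : List ((Int × Int) × (Int × Int))) (pref : List Int) (rem : Int) :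
    List Int → Int → Int
  | [], time => time
  | i :: rest, time =>
    let e := PySem.List.pyGetD rows (i - 1) ((0, 0), (0, 0))
    if e.1.1 == i - 1 then currentLoop rows pref rem rest (time + 1)
    else
      let hobe := PySem.List.pyGetD pref i 0 - e.2.2 + e.2.1
      if hobe ≥ rem then time + 1
      else currentLoop rows pref rem rest (time + 1)

def current (n : Int) (h_ : Int) (k : Int) (a : List Int) : Int :=
  let rows := currentRows a n
  let s := a.sum
  let cy := PySem.Int.floordiv h_ s
  let time := cy * n + max 0 (cy - 1) * k
  if PySem.Int.mod h_ s == 0 then time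
  else
    let time := if cy > 0 then time + k else time
    let rem := PySem.Int.mod h_ s
    let pref := (PySem.List.pyRange 0 n 1).foldl
      (fun acc i => acc ++ [PySem.List.pyGetD acc i 0 + PySem.List.pyGetD a i 0]) [0]
    currentLoop rows pref rem (PySem.List.pyRange 1 (n + 1) 1) time

-- ===== PORT B =====
-- right-to-left sweep of Source B: per position the suffix max and whether it is
-- attained at this position (ties included); built by structural recursion from
-- the right, so sufScan (x :: xs) = entry :: sufScan xs.
def sufScan : List Int → List (Int × Bool)
  | [] => []
  | x :: rest =>
    match sufScan rest with
    | [] => [(x, true)]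
    | (b, f) :: r => if x ≥ b then (x, true) :: (b, f) :: r else (b, false) :: (b, f) :: r

-- forward loop of Source B over i in range(n), walking the (a[i], (sufmax[i], att[i])) pairs
def altLoop (rem : Int) : List (Int × (Int × Bool)) → Int → Int → Option Int → Int → Int
  | [], _, time, _, _ => time
  | (x, (sm, att)) :: rest, cnt, time, pmin, pref =>
    if cnt ≤ 0 then time
    else
      let pref' := pref + x
      let pmin' := match pmin with | none => x | some p => min p x
      let time' := time + 1
      if !att && decide (pref' - pmin' + sm ≥ rem) then time'
      else altLoop rem rest (cnt - 1) time' (some pmin') pref'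

def current_alt (n : Int) (h_ : Int) (k : Int) (a : List Int) : Int :=
  let scan := sufScan a
  let s := a.sum
  let cy := PySem.Int.floordiv h_ s
  let time := cy * n + max 0 (cy - 1) * k
  let rem := PySem.Int.mod h_ s
  if rem == 0 then time
  else
    let time := if cy > 0 then time + k else time
    altLoop rem (a.zip scan) n time none 0

-- ===== PRECONDITION & SPEC =====
-- Pre_ excludes exactly the inputs on which A raises: sum(a) = 0 (ZeroDivisionError
-- at h//s) and n > len(a) (ValueError: max() of an empty slice in the first loop).
def Pre_current (n : Int) (h_ : Int) (k : Int) (a : List Int) : Prop :=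
  a.sum ≠ 0 ∧ n ≤ (a.length : Int)
instance (n : Int) (h_ : Int) (k : Int) (a : List Int) : Decidable (Pre_current n h_ k a) := by
  unfold Pre_current; infer_instance

def pvWitness_current : Int × Int × Int × List Int := (3, 10, 2, [3, 1, 2])

def Spec_current (n : Int) (h_ : Int) (k : Int) (a : List Int) (out : Int) : Prop :=
  out = current_alt n h_ k a
instance (n : Int) (h_ : Int) (k : Int) (a : List Int) (out : Int) : Decidable (Spec_current n h_ k a out) := by
  unfold Spec_current; infer_instance

-- ===== CLAIM (what is proved, stated in full; the proofs are below) =====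
def Claim_equal_current : Prop := ∀ (n : Int) (h_ : Int) (k : Int) (a : List Int),
  Dom_current n h_ k a → Pre_current n h_ k a → Spec_current n h_ k a (current n h_ k a)

-- ===== LEMMAS AND PROOFS =====

theorem sufScan_cons (x : Int) (xs : List Int) :
    sufScan (x :: xs) = (xs.foldl max x, decide (xs.foldl max x = x)) :: sufScan xs := by
  induction xs generalizing x with
  | nil => simp [sufScan]
  | cons y ys ih =>
    rw [sufScan, ih y]
    have hb : List.foldl max x (y :: ys) = max x (List.foldl max y ys) := by
      simp [List.foldl_cons]; exact (List.foldl_assoc (op := max) ..)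
    by_cases hxb : x ≥ List.foldl max y ys
    · have hx : List.foldl max x (y :: ys) = x := by rw [hb]; omega
      simp [hxb, hx]
    · have hx : List.foldl max x (y :: ys) = List.foldl max y ys := by rw [hb]; omega
      have hne : ¬ (List.foldl max x (y :: ys) = x) := by rw [hx]; omega
      simp [hxb, hx]
      omega

theorem sufScan_drop (a : List Int) (t : Nat) : (sufScan a).drop t = sufScan (a.drop t) := by
  induction a generalizing t with
  | nil => simp [sufScan]
  | cons x xs ih =>
    cases t with
    | zero => simp
    | succ t => rw [sufScan_cons]; simpa using ih t

theorem zip_drop' {α β : Type} (a : List α) (s : List β) (t : Nat) :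
    (a.zip s).drop t = (a.drop t).zip (s.drop t) := by
  induction a generalizing s t with
  | nil => simp
  | cons x xs ih =>
    cases s with
    | nil => simp
    | cons y ys =>
      cases t with
      | zero => simp
      | succ t => simpa using ih ys t

theorem sum_take_succ (a : List Int) (n : Nat) :
    (a.take (n+1)).sum = (a.take n).sum + a.getD n 0 := by
  rw [List.take_add_one]
  cases h : a[n]? with
  | none => simp [List.getD, h]
  | some v => simp [List.getD, h]

theorem min?_append_singleton (l : List Int) (x : Int) :
    PySem.List.min? (l ++ [x]) (fun y => y) =
      some (match PySem.List.min? l (fun y => y) with | none => x | some p => min p x) := by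
  cases l with
  | nil => simp [PySem.List.min?]
  | cons d ds =>
    rw [List.cons_append, PySem.List.min?_id_cons, PySem.List.min?_id_cons]
    simp [List.foldl_append]

theorem prefA (a : List Int) (n : Nat) :
    (PySem.List.pyRange 0 (n : Int) 1).foldl
      (fun acc i => acc ++ [PySem.List.pyGetD acc i 0 + PySem.List.pyGetD a i 0]) [0]
    = (List.range (n+1)).map (fun t => (a.take t).sum) := by
  induction n with
  | zero => simp
  | succ m ih =>
    have hr : PySem.List.pyRange 0 ((m+1 : Nat) : Int) 1
        = PySem.List.pyRange 0 (m : Int) 1 ++ [(m : Int)] := by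
      push_cast
      exact PySem.List.pyRange_one_succ_right (by positivity)
    rw [hr, List.foldl_append, ih]
    rw [List.range_succ (n := m+1), List.map_append]
    simp only [List.foldl_cons, List.foldl_nil]
    congr 1
    simp only [PySem.List.pyGetD_natCast, List.map_singleton]
    congr 1
    rw [List.getD_eq_getElem?_getD, List.getElem?_map, List.getElem?_range (by omega)]
    simp [sum_take_succ]

theorem loop_eq (a : List Int) (n : Int) (hn : n ≤ (a.length : Int)) (rem : Int) :
    ∀ (m : Nat) (t : Nat), (t : Int) ≤ n → m = (n - t).toNat → ∀ (time : Int),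
    currentLoop (currentRows a n) ((List.range (n.toNat+1)).map (fun u => (a.take u).sum)) rem
        (PySem.List.pyRange ((t : Int)+1) (n+1) 1) time
    = altLoop rem ((a.zip (sufScan a)).drop t) (n - (t : Int)) time
        (PySem.List.min? (a.take t) (fun y => y)) ((a.take t).sum) := by
  intro m
  induction m with
  | zero =>
    intro t ht hm time
    have htn : (t : Int) = n := by omega
    rw [PySem.List.pyRange_one_eq_nil (by omega)]
    cases hzd : (a.zip (sufScan a)).drop t with
    | nil => simp [currentLoop, altLoop]
    | cons p rest =>
      obtain ⟨x, sm, att⟩ := p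
      simp [currentLoop, altLoop, htn]
  | succ m ih =>
    intro t ht hm time
    have htn : (t : Int) < n := by omega
    have htl : t < a.length := by omega
    set c := a[t] with hc
    have hdrop : a.drop t = c :: a.drop (t+1) := List.drop_eq_getElem_cons htl
    have hzdrop : (a.zip (sufScan a)).drop t
        = (c, (a.drop (t+1)).foldl max c, decide ((a.drop (t+1)).foldl max c = c))
          :: (a.zip (sufScan a)).drop (t+1) := by
      rw [zip_drop', zip_drop', sufScan_drop a t, hdrop, sufScan_cons]
      simp [sufScan_drop]
    set B := (a.drop (t+1)).foldl max c with hB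
    -- values A reads at this step
    have hrow : PySem.List.pyGetD (currentRows a n) ((t : Int)) ((0,0),(0,0))
        = ((((PySem.List.index? (a.drop t) B).map (fun j => (j : Int) + (t : Int))).getD 0,
            ((PySem.List.index? (a.take (t+1)) ((PySem.List.min? (a.take (t+1)) (fun y => y)).getD 0)).map (fun j => (j : Int))).getD 0),
           (B, (PySem.List.min? (a.take (t+1)) (fun y => y)).getD 0)) := by
      rw [currentRows, PySem.List.pyGetD_map_pyRange_of_nonneg _ _ _ _ (by omega) htn]
      have h1 : PySem.List.slice a (some ((t : Int))) none = a.drop t := by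
        exact PySem.List.slice_from_natCast ..
      have h2 : PySem.List.slice a none (some ((t : Int) + 1)) = a.take (t+1) := by
        have : ((t : Int) + 1) = ((t + 1 : Nat) : Int) := by push_cast; ring
        rw [this]; exact PySem.List.slice_to_natCast ..
      simp only [h1, h2, hdrop, PySem.List.max?_id_cons, Option.getD_some, ← hB]
    have htake : a.take (t+1) = a.take t ++ [c] := by
      rw [List.take_add_one]
      have : a[t]? = some c := List.getElem?_eq_getElem htl
      simp [this]
    have hmin : PySem.List.min? (a.take (t+1)) (fun y => y)
        = some (match PySem.List.min? (a.take t) (fun y => y) with | none => c | some p => min p c) := by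
      rw [htake, min?_append_singleton]
    have hsum : (a.take (t+1)).sum = (a.take t).sum + c := by
      rw [sum_take_succ]
      congr 1
      rw [List.getD_eq_getElem?_getD, List.getElem?_eq_getElem htl]
      rfl
    have hpref : PySem.List.pyGetD ((List.range (n.toNat+1)).map (fun u => (a.take u).sum)) ((t : Int) + 1) 0
        = (a.take (t+1)).sum := by
      have : ((t : Int) + 1) = ((t + 1 : Nat) : Int) := by push_cast; ring
      rw [this, PySem.List.pyGetD_natCast, List.getD_eq_getElem?_getD, List.getElem?_map,
          List.getElem?_range (by omega)]
      rfl
    -- unfold one step of each loop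
    rw [PySem.List.pyRange_one_cons (by omega), hzdrop]
    simp only [currentLoop, altLoop]
    have hstep : (t : Int) + 1 - 1 = (t : Int) := by ring
    rw [hstep, hrow]
    have hcnt : ¬ (n - (t : Int) ≤ 0) := by omega
    rw [if_neg hcnt]
    have hrange : PySem.List.pyRange ((t : Int) + 1 + 1) (n + 1) 1
        = PySem.List.pyRange (((t+1 : Nat) : Int) + 1) (n + 1) 1 := by push_cast; ring_nf
    have hIH := ih (t+1) (by omega) (by omega) (time + 1)
    by_cases hcB : c = B
    · -- suffix max attained at position t: both sides continue
      have hidx : PySem.List.index? (a.drop t) B = some 0 := by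
        rw [hdrop, ← hcB]; exact PySem.List.index?_cons_self ..
      have hcond : ((((PySem.List.index? (a.drop t) B).map (fun j => (j : Int) + (t : Int))).getD 0) == (t : Int)) = true := by
        rw [hidx]; simp
      simp only [hcond, if_true]
      have hatt : decide (B = c) = true := by simp [hcB]
      rw [hatt]
      simp only [Bool.not_true, Bool.false_and, if_false, Bool.false_eq_true]
      rw [hrange, hIH, hmin, hsum]
      have : n - ((t+1 : Nat) : Int) = n - (t : Int) - 1 := by push_cast; ring
      rw [this]
    · -- not attained: A consults hobe, B consults the same quantity
      have hBmem : B ∈ a.drop (t+1) := by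
        have hmax : PySem.List.max? (a.drop t) (fun y => y) = some B := by
          rw [hdrop, PySem.List.max?_id_cons, hB]
        have := PySem.List.max?_mem hmax
        rw [hdrop] at this
        rcases List.mem_cons.mp this with h | h
        · exact absurd h.symm hcB
        · exact h
      have hidx : ∃ j, PySem.List.index? (a.drop t) B = some (j + 1) := by
        rw [hdrop, PySem.List.index?_cons_of_ne _ hcB]
        obtain ⟨j, hj⟩ := Option.isSome_iff_exists.mp ((PySem.List.index?_isSome_iff _ _).mpr hBmem)
        exact ⟨j, by rw [hj]; rfl⟩
      obtain ⟨j, hj⟩ := hidx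
      have hcond : ((((PySem.List.index? (a.drop t) B).map (fun j => (j : Int) + (t : Int))).getD 0) == (t : Int)) = false := by
        rw [hj]; simp; omega
      simp only [hcond, if_false, Bool.false_eq_true]
      have hatt : decide (B = c) = false := by simp; exact fun h => hcB h.symm
      rw [hatt]
      simp only [Bool.not_false, Bool.true_and]
      rw [hpref, hmin, hsum]
      set pmin' : Int := (match PySem.List.min? (a.take t) (fun y => y) with | none => c | some p => min p c) with hpm
      simp only [Option.getD_some]
      by_cases hre : (a.take t).sum + c - pmin' + B ≥ rem
      · rw [if_pos hre, if_pos (by simpa using hre)]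
      · rw [if_neg hre, if_neg (by simpa using hre)]
        rw [hrange, hIH, hmin, hsum]
        have : n - ((t+1 : Nat) : Int) = n - (t : Int) - 1 := by push_cast; ring
        rw [this]

-- ===== VERDICT (by name: the statement is the Claim_ definition above) =====
theorem current_spec : Claim_equal_current := by
  intro n h_ k a _ hpre
  obtain ⟨hs, hn⟩ := hpre
  unfold Spec_current current current_alt
  by_cases hmod : (PySem.Int.mod h_ a.sum == 0) = true
  · simp only [hmod, if_true]
  · simp only [hmod, if_false, Bool.false_eq_true]
    set time := (if PySem.Int.floordiv h_ a.sum > 0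
        then PySem.Int.floordiv h_ a.sum * n + max 0 (PySem.Int.floordiv h_ a.sum - 1) * k + k
        else PySem.Int.floordiv h_ a.sum * n + max 0 (PySem.Int.floordiv h_ a.sum - 1) * k) with htime
    by_cases hneg : n < 0
    · rw [PySem.List.pyRange_one_eq_nil (a := 1) (b := n + 1) (by omega)]
      cases hz : a.zip (sufScan a) with
      | nil => simp [currentLoop, altLoop]
      | cons p rest =>
        obtain ⟨x, sm, att⟩ := p
        simp [currentLoop, altLoop, show n ≤ 0 by omega]
    · have h0 : n = ((n.toNat : Nat) : Int) := by omega
      have hprefEq : (PySem.List.pyRange 0 n 1).foldl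
          (fun acc i => acc ++ [PySem.List.pyGetD acc i 0 + PySem.List.pyGetD a i 0]) [0]
          = (List.range (n.toNat+1)).map (fun t => (a.take t).sum) := by
        rw [h0]; exact prefA a n.toNat
      rw [hprefEq]
      have hmain := loop_eq a n hn (PySem.Int.mod h_ a.sum) (n.toNat) 0 (by omega) (by omega) time
      simp only [Nat.cast_zero, zero_add, List.take_zero, List.drop_zero, List.sum_nil,
        sub_zero] at hmain
      rw [hmain]
      have hmn : PySem.List.min? ([] : List Int) (fun y => y) = none := by
        simp [PySem.List.min?]
      rw [hmn]
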